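-- pv_equiv track=rewrite | github.com/waaangdev/ps | 백준/Gold/25547. 신기한 숫자/신기한 숫자.py | segche
-- ===== SOURCE A (Python) =====
-- def segche(l,r,maxr):#세그체~ l부터 r-1까지 루트(maxr) 이상의 소수를 제외한 소인수분해
--     li = [0]*(50000+1)#소수
--     li2 = [0]*(50000+1)#제곱수
--     li22 = [0]*(50000+1)
--     rli = [[] for i in range(r-l)]
--     for i in range(2,len(li)):
--         if(li[i]==0):
--             st = i+i
--             for j in range(st,len(li),i):
--                 li[j]=1
--                 if(li22[j]!=0 and li22[j]!=i):li2[j] = 1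
--                 li22[j] = i
--             i2 = 1
--             for k in range(50):
--                 i2*=i
--                 if(i2 >= r):break
--                 st = max(i2,((l-1)//i2+1)*i2)
--                 for j in range(st,r,i2):
--                     rli[j-l].append(i)
--     return rli
-- ===== SOURCE B (Python) =====
-- def segche(l, r, maxr):
--     # Sieve the primes up to 50000 once; then for each prime make a single pass
--     # over its multiples in [l, r) and divide that position's own value down,
--     # appending one copy of the prime per division.  (A instead enumerates the
--     # prime POWERS p, p^2, p^3, ... and does one marking pass per power.)
--     comp = [0] * 50001
--     primes = []
--     for i in range(2, 50001):
--         if comp[i] == 0: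
--             primes.append(i)
--             for j in range(i + i, 50001, i):
--                 comp[j] = 1
--     rli = [[] for _ in range(r - l)]
--     for p in primes:
--         st = max(p, ((l - 1) // p + 1) * p)
--         for j in range(st, r, p):
--             m = j
--             while m % p == 0:
--                 rli[j - l].append(p)
--                 m //= p
--     return rli
-- ===== Notes on version B (the rewrite author's own statement) =====
-- stated objective: alternative
-- what changed: A enumerates each prime's POWERS p, p^2, p^3, ... and does one marking pass over the segment per power; B sieves the primes once and then makes a single pass per prime over its multiples, dividing that position's own value down and appending one copy per division (no power enumeration).
import Mathlib
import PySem

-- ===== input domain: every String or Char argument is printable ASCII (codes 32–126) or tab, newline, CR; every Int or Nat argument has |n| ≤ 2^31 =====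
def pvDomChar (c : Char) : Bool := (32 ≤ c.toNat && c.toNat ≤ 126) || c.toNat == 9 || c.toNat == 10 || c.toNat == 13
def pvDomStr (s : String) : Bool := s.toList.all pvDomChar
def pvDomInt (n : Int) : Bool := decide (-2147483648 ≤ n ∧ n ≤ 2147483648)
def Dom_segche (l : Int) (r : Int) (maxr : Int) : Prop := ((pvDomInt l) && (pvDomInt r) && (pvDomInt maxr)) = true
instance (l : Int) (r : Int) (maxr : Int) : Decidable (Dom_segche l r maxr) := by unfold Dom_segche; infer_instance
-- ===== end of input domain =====

-- B sieves primes once and then factors each position independently by repeated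
-- division (position-major), instead of A's prime-power-major range marking.

-- ===== PORT A =====
-- the body of A's marking loop: li[j]=1; if(li22[j]!=0 and li22[j]!=i): li2[j]=1; li22[j]=i
def segcheMark (i : Int) (s : Array Int × Array Int × Array Int) (j : Int) :
    Array Int × Array Int × Array Int :=
  (s.1.set! j.toNat 1,
   if s.2.2.getD j.toNat 0 ≠ 0 ∧ s.2.2.getD j.toNat 0 ≠ i then s.2.1.set! j.toNat 1 else s.2.1,
   s.2.2.set! j.toNat i)

-- A's power loop: 'for k in range(50): i2 *= i; if i2 >= r: break; …' (fuel = the 50)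
def segcheInner (l r i : Int) : Nat → Int → List (List Int) → List (List Int)
  | 0, _, rli => rli
  | Nat.succ fuel, i2, rli =>
    let i2' := i2 * i
    if r ≤ i2' then rli
    else
      let st := max i2' ((PySem.Int.floordiv (l - 1) i2' + 1) * i2')
      segcheInner l r i fuel i2'
        ((PySem.List.pyRange st r i2').foldl (fun a j => a.modify (j - l).toNat (· ++ [i])) rli)

-- one iteration of A's outer loop (index i in range(2, len(li)))
def segcheStep (l r : Int) (s : Array Int × Array Int × Array Int × List (List Int)) (i : Int) :
    Array Int × Array Int × Array Int × List (List Int) :=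
  if s.1.getD i.toNat 0 == 0 then
    let m := (PySem.List.pyRange (i + i) 50001 i).foldl (segcheMark i) (s.1, s.2.1, s.2.2.1)
    (m.1, m.2.1, m.2.2, segcheInner l r i 50 1 s.2.2.2)
  else s

-- the outer 'for i in range(2, len(li))' loop, returning rli at the end
def segcheLoop (l r : Int) (s : Array Int × Array Int × Array Int × List (List Int)) :
    List Int → List (List Int)
  | [] => s.2.2.2
  | i :: is => segcheLoop l r (segcheStep l r s i) is

def segche (l : Int) (r : Int) (maxr : Int) : List (List Int) :=
  segcheLoop l r
    (Array.replicate 50001 0, Array.replicate 50001 0, Array.replicate 50001 0,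
     List.replicate (r - l).toNat [])
    (PySem.List.pyRange 2 50001 1)

-- ===== PORT B =====
-- 'm = n; while m % p == 0: fac.append(p); m //= p' (fuel n.toNat suffices for n ≥ 1, p ≥ 2)
def altDiv (p : Int) : Nat → Int → List Int → List Int
  | 0, _, fac => fac
  | Nat.succ fuel, m, fac =>
    if PySem.Int.mod m p == 0 then altDiv p fuel (PySem.Int.floordiv m p) (fac ++ [p]) else fac

-- one iteration of B's sieve loop
def altSieveStep (s : Array Int × List Int) (i : Int) : Array Int × List Int :=
  if s.1.getD i.toNat 0 == 0 then
    ((PySem.List.pyRange (i + i) 50001 i).foldl (fun c j => c.set! j.toNat 1) s.1, s.2 ++ [i])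
  else s

-- B's sieve phase, returning the primes list it builds
def altSieveLoop (s : Array Int × List Int) : List Int → List Int
  | [] => s.2
  | i :: is => altSieveLoop (altSieveStep s i) is

def altPrimes : List Int :=
  altSieveLoop (Array.replicate 50001 0, []) (PySem.List.pyRange 2 50001 1)

def segche_alt (l : Int) (r : Int) (maxr : Int) : List (List Int) :=
  altPrimes.foldl
    (fun rli p =>
      (PySem.List.pyRange (max p ((PySem.Int.floordiv (l - 1) p + 1) * p)) r p).foldl
        (fun a j => a.modify (j - l).toNat (fun fac => altDiv p j.toNat j fac)) rli)
    (List.replicate (r - l).toNat [])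

-- ===== PRECONDITION & SPEC =====
def Spec_segche (l : Int) (r : Int) (maxr : Int) (out : List (List Int)) : Prop := out = segche_alt l r maxr
instance (l : Int) (r : Int) (maxr : Int) (out : List (List Int)) : Decidable (Spec_segche l r maxr out) := by unfold Spec_segche; infer_instance

-- ===== CLAIM (what is proved, stated in full; the proofs are below) =====
def Claim_equal_segche : Prop := ∀ (l : Int) (r : Int) (maxr : Int), Dom_segche l r maxr → Spec_segche l r maxr (segche l r maxr)

-- ===== LEMMAS AND PROOFS =====

-- multiplicity of p in m, computed exactly as altDiv counts it
def pmul (p : Int) : Nat → Int → Nat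
  | 0, _ => 0
  | Nat.succ fuel, m =>
    if PySem.Int.mod m p = 0 then pmul p fuel (PySem.Int.floordiv m p) + 1 else 0

-- the count of p's that A's power loop (from power exponent t on) appends at position n
def cnt (p : Int) (t : Nat) (n : Int) : Nat :=
  if 1 ≤ n then pmul p n.toNat n - min t (pmul p n.toNat n) else 0

-- what B appends at position n for the whole prime list
def slotCat (ps : List Int) (n : Int) : List Int :=
  ps.foldl (fun fac q => fac ++ List.replicate (cnt q 0 n) q) []

theorem altDiv_eq (p : Int) (fuel : Nat) (m : Int) (fac : List Int) :
    altDiv p fuel m fac = fac ++ List.replicate (pmul p fuel m) p := by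
  induction fuel generalizing m fac with
  | zero => simp [altDiv, pmul]
  | succ fuel ih =>
    simp only [altDiv, pmul]
    by_cases h : PySem.Int.mod m p = 0
    · simp [h, ih, List.replicate_succ, List.append_assoc]
    · simp [h]

theorem pmul_spec (p : Int) (hp : 2 ≤ p) :
    ∀ (fuel : Nat) (m : Int), 1 ≤ m → m.toNat ≤ fuel →
      p ^ (pmul p fuel m) ∣ m ∧ ¬ p ^ (pmul p fuel m + 1) ∣ m := by
  intro fuel
  induction fuel with
  | zero => intro m hm hf; omega
  | succ fuel ih =>
    intro m hm hf
    by_cases h : PySem.Int.mod m p = 0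
    · have hd : p ∣ m := (PySem.Int.mod_eq_zero_iff_dvd m p).1 h
      have hp0 : (0:Int) < p := by omega
      have hfe : PySem.Int.floordiv m p = m / p := PySem.Int.floordiv_eq_ediv_of_pos hp0
      have hmm : p * (m / p) = m := Int.mul_ediv_cancel' hd
      have hm1 : 1 ≤ m / p := by nlinarith [Int.le_of_lt (show (0:Int) < m / p from by nlinarith [hmm])]
      have hlt : m / p < m := by nlinarith
      have hft : (m / p).toNat ≤ fuel := by omega
      obtain ⟨h1, h2⟩ := ih (m / p) hm1 hft
      constructor
      · have hdd : p ^ (pmul p fuel (m / p) + 1) ∣ p * (m / p) := by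
          rw [pow_succ']
          exact mul_dvd_mul_left p h1
        rw [hmm] at hdd
        simpa [pmul, h, hfe] using hdd
      · intro hc
        apply h2
        have hc' : p ^ (pmul p fuel (m / p) + 1 + 1) ∣ m := by
          simpa [pmul, h, hfe] using hc
        have hdd : p * p ^ (pmul p fuel (m / p) + 1) ∣ p * (m / p) := by
          rw [hmm, ← pow_succ']
          exact hc'
        exact (mul_dvd_mul_iff_left (by omega : p ≠ 0)).1 hdd
    · constructor
      · simp [pmul, h]
      · intro hc
        apply h
        apply (PySem.Int.mod_eq_zero_iff_dvd m p).2
        simpa [pmul, h] using hc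

theorem pmul_dvd_iff (p : Int) (hp : 2 ≤ p) (n : Int) (hn : 1 ≤ n) (k : Nat) :
    p ^ k ∣ n ↔ k ≤ pmul p n.toNat n := by
  obtain ⟨h1, h2⟩ := pmul_spec p hp n.toNat n hn le_rfl
  constructor
  · intro hk
    by_contra hlt
    exact h2 (dvd_trans (pow_dvd_pow p (by omega)) hk)
  · intro hk
    exact dvd_trans (pow_dvd_pow p hk) h1

-- the marking fold's first component ignores li2/li22
theorem mark_fst (i : Int) (js : List Int) :
    ∀ (s : Array Int × Array Int × Array Int),
      (js.foldl (segcheMark i) s).1 = js.foldl (fun c j => c.set! j.toNat 1) s.1 := by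
  induction js with
  | nil => intro s; rfl
  | cons j js ih => intro s; simp [List.foldl_cons, ih, segcheMark]

-- modifying the k-th slot of a range-indexed table
theorem modify_map_range (l r j : Int) (G : Int → List Int) (f : List Int → List Int)
    (hj : l ≤ j) (hjr : j < r) :
    ((PySem.List.pyRange l r 1).map G).modify (j - l).toNat f
      = (PySem.List.pyRange l r 1).map (fun x => if x = j then f (G x) else G x) := by
  apply List.ext_getElem
  · simp [List.length_modify]
  · intro k h1 h2
    have hk : k < (r - l).toNat := by
      simpa [List.length_modify, PySem.List.length_pyRange_one] using h1
    have hget : (PySem.List.pyRange l r 1)[k]'(by simpa [PySem.List.length_pyRange_one] using hk) = l + (k : Int) :=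
      PySem.List.getElem_pyRange_one l r k _
    rw [List.getElem_modify]
    simp only [List.getElem_map, hget]
    by_cases he : l + (k : Int) = j
    · have : (j - l).toNat = k := by omega
      simp [he, this]
    · have : ¬ (j - l).toNat = k := by omega
      simp [he, this]

-- one appending pass over a duplicate-free list of in-range positions
theorem foldl_modify_map_range (l r : Int) (h : Int → List Int) (js : List Int) (G : Int → List Int)
    (hnd : js.Nodup) (hb : ∀ j ∈ js, l ≤ j ∧ j < r) :
    js.foldl (fun a j => a.modify (j - l).toNat (· ++ h j)) ((PySem.List.pyRange l r 1).map G)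
      = (PySem.List.pyRange l r 1).map (fun x => if x ∈ js then G x ++ h x else G x) := by
  induction js generalizing G with
  | nil => simp
  | cons j js ih =>
    obtain ⟨hjl, hjr⟩ := hb j (by simp)
    rw [List.foldl_cons, modify_map_range l r j G (· ++ h j) hjl hjr,
        ih (fun x => if x = j then G x ++ h j else G x) (List.Nodup.of_cons hnd)
          (fun x hx => hb x (List.mem_cons_of_mem j hx))]
    apply List.map_congr_left
    intro x _
    by_cases hxj : x = j
    · subst hxj
      have hnm : x ∉ js := (List.nodup_cons.1 hnd).1
      simp [hnm]
    · simp [hxj]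

theorem nodup_pyRange_pos (a b s : Int) (hs : 0 < s) : (PySem.List.pyRange a b s).Nodup := by
  rw [PySem.List.pyRange_of_pos a b hs]
  apply List.Nodup.map _ List.nodup_range
  intro x y hxy
  have h1 : s * (x : Int) = s * (y : Int) := by linarith [hxy]
  have h2 : (x : Int) = (y : Int) := mul_left_cancel₀ (by omega) h1
  exact_mod_cast h2

theorem cnt_eq_zero (p : Int) (hp : 2 ≤ p) (t : Nat) (n : Int) (hn : n < p ^ t * p) :
    cnt p t n = 0 := by
  unfold cnt
  split
  · rename_i h1
    have hc : p ^ (pmul p n.toNat n) ∣ n := (pmul_spec p hp n.toNat n h1 le_rfl).1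
    have hle : p ^ (pmul p n.toNat n) ≤ n := Int.le_of_dvd (by omega) hc
    have hps : (p:Int) ^ t * p = p ^ (t + 1) := (pow_succ p t).symm
    have hlt : pmul p n.toNat n < t + 1 := by
      have := (pow_lt_pow_iff_right₀ (show (1:Int) < p by omega)
        (n := pmul p n.toNat n) (m := t + 1)).1 (by omega)
      exact this
    omega
  · rfl

theorem mem_markRange_iff (l r P : Int) (hP : 2 ≤ P) (x : Int) (hxl : l ≤ x) (hxr : x < r) :
    x ∈ PySem.List.pyRange (max P ((PySem.Int.floordiv (l - 1) P + 1) * P)) r P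
      ↔ 1 ≤ x ∧ P ∣ x := by
  have hP0 : (0:Int) < P := by omega
  set fd := PySem.Int.floordiv (l - 1) P with hfd
  have hfdb : fd * P ≤ l - 1 ∧ l - 1 < (fd + 1) * P :=
    (PySem.Int.floordiv_eq_iff_of_pos hP0).1 hfd.symm
  have hMdvd : P ∣ (fd + 1) * P := ⟨fd + 1, by ring⟩
  have hstdvd : P ∣ max P ((fd + 1) * P) := by
    rcases max_choice P ((fd + 1) * P) with h | h
    · rw [h]
    · rw [h]
      exact hMdvd
  rw [PySem.List.mem_pyRange_iff_of_pos hP0]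
  constructor
  · rintro ⟨hst, _, hdv⟩
    have hx1 : 1 ≤ x := by
      have : P ≤ max P ((fd + 1) * P) := le_max_left _ _
      omega
    exact ⟨hx1, by
      have := dvd_add hdv hstdvd
      simpa using this⟩
  · rintro ⟨hx1, hdv⟩
    obtain ⟨q, hq⟩ := hdv
    have hq1 : 1 ≤ q := by nlinarith
    have hxP : P ≤ x := by nlinarith
    have hqfd : fd < q := by nlinarith
    have hxM : (fd + 1) * P ≤ x := by nlinarith
    refine ⟨by omega, by omega, ?_⟩
    exact dvd_sub ⟨q, hq⟩ hstdvd

theorem inner_spec (l r p : Int) (hp : 2 ≤ p) :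
    ∀ (fuel : Nat) (t : Nat) (G : Int → List Int), r ≤ p ^ (t + fuel) →
      segcheInner l r p fuel (p ^ t) ((PySem.List.pyRange l r 1).map G)
        = (PySem.List.pyRange l r 1).map (fun n => G n ++ List.replicate (cnt p t n) p) := by
  intro fuel
  induction fuel with
  | zero =>
    intro t G hr
    rw [Nat.add_zero] at hr
    apply Eq.symm
    apply List.map_congr_left
    intro n hn
    have hnb := PySem.List.mem_pyRange_one.1 hn
    have h1 : (1:Int) ≤ p ^ t := one_le_pow₀ (by omega)
    rw [cnt_eq_zero p hp t n (by nlinarith)]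
    simp
  | succ fuel ih =>
    intro t G hr
    have hp1 : (1:Int) < p := by omega
    have hps : (p:Int) ^ t * p = p ^ (t + 1) := (pow_succ p t).symm
    have hP2 : (2:Int) ≤ p ^ t * p := by
      have h1 : (1:Int) ≤ p ^ t := one_le_pow₀ (by omega)
      nlinarith
    simp only [segcheInner]
    split
    · rename_i hbr
      apply Eq.symm
      apply List.map_congr_left
      intro n hn
      have hnb := PySem.List.mem_pyRange_one.1 hn
      rw [cnt_eq_zero p hp t n (by omega)]
      simp
    · rename_i hbr
      rw [not_le] at hbr
      rw [foldl_modify_map_range l r (fun _ => [p]) _ G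
            (nodup_pyRange_pos _ _ _ (by omega))
            (fun j hj => by
              obtain ⟨h1, h2, _⟩ := (PySem.List.mem_pyRange_iff_of_pos (by omega : (0:Int) < p ^ t * p) j).1 hj
              have hM : l - 1 < (PySem.Int.floordiv (l - 1) (p ^ t * p) + 1) * (p ^ t * p) :=
                ((PySem.Int.floordiv_eq_iff_of_pos (by omega)).1 rfl).2
              constructor
              · have := le_max_right (p ^ t * p) ((PySem.Int.floordiv (l - 1) (p ^ t * p) + 1) * (p ^ t * p))
                omega
              · exact h2)]
      rw [hps, ih (t + 1) _ (by
        have : t + 1 + fuel = t + (fuel + 1) := by omega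
        rw [this]; exact hr)]
      apply List.map_congr_left
      intro n hn
      have hnb := PySem.List.mem_pyRange_one.1 hn
      have hiff := mem_markRange_iff l r (p ^ (t + 1)) (by rw [← hps]; exact hP2) n hnb.1 hnb.2
      split_ifs with hmem
      · obtain ⟨hn1, hdv⟩ := hiff.1 hmem
        have hle : t + 1 ≤ pmul p n.toNat n := (pmul_dvd_iff p hp n hn1 (t + 1)).1 hdv
        rw [cnt, cnt, if_pos hn1, if_pos hn1]
        have h1 : pmul p n.toNat n - min t (pmul p n.toNat n)
            = (pmul p n.toNat n - min (t + 1) (pmul p n.toNat n)) + 1 := by omega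
        rw [h1, List.replicate_succ, List.append_assoc]
        rfl
      · have hc : ¬ (1 ≤ n ∧ p ^ (t + 1) ∣ n) := fun h => hmem (hiff.2 h)
        have hcnt : cnt p (t + 1) n = cnt p t n := by
          unfold cnt
          split
          · rename_i h1
            have hnd : ¬ p ^ (t + 1) ∣ n := fun hd => hc ⟨h1, hd⟩
            have hnle : ¬ (t + 1) ≤ pmul p n.toNat n := fun hle =>
              hnd ((pmul_dvd_iff p hp n h1 (t + 1)).2 hle)
            omega
          · rfl
        rw [hcnt]

theorem slotCat_eq (ps : List Int) (n : Int) :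
    slotCat ps n = ps.flatMap (fun q => List.replicate (cnt q 0 n) q) := by
  unfold slotCat
  simpa using PySem.List.foldl_append_eq_flatMap (fun q => List.replicate (cnt q 0 n) q) ps []

theorem slotCat_cons (p : Int) (ps : List Int) (n : Int) :
    slotCat (p :: ps) n = List.replicate (cnt p 0 n) p ++ slotCat ps n := by
  simp [slotCat_eq]

theorem phase2 (l r : Int) (hr : r ≤ 2147483648) :
    ∀ (ps : List Int) (G : Int → List Int), (∀ p ∈ ps, 2 ≤ p) →
      ps.foldl (fun rli p => segcheInner l r p 50 1 rli) ((PySem.List.pyRange l r 1).map G)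
        = (PySem.List.pyRange l r 1).map (fun n => G n ++ slotCat ps n) := by
  intro ps
  induction ps with
  | nil =>
    intro G _
    simp [slotCat]
  | cons p ps ih =>
    intro G h
    have hp2 : 2 ≤ p := h p (List.mem_cons_self)
    rw [List.foldl_cons]
    have hb : r ≤ p ^ (0 + 50) := by
      have h2 : (2:Int) ^ 50 ≤ p ^ 50 := pow_le_pow_left₀ (by norm_num) hp2 50
      norm_num at h2 ⊢
      omega
    have hi := inner_spec l r p hp2 50 0 G hb
    rw [pow_zero] at hi
    rw [hi, ih _ (fun q hq => h q (List.mem_cons_of_mem p hq))]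
    apply List.map_congr_left
    intro n _
    rw [slotCat_cons, List.append_assoc]

theorem pmul_zero_of_not_dvd (p n : Int) (hn : 1 ≤ n) (hnd : ¬ p ∣ n) :
    pmul p n.toNat n = 0 := by
  have h1 : ∃ f, n.toNat = f + 1 := ⟨n.toNat - 1, by omega⟩
  obtain ⟨f, hf⟩ := h1
  rw [hf, pmul]
  rw [if_neg]
  intro hm
  exact hnd ((PySem.Int.mod_eq_zero_iff_dvd n p).1 hm)

theorem altMark_spec (l r p : Int) (hp : 2 ≤ p) (G : Int → List Int) :
    (PySem.List.pyRange (max p ((PySem.Int.floordiv (l - 1) p + 1) * p)) r p).foldl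
        (fun a j => a.modify (j - l).toNat (fun fac => altDiv p j.toNat j fac))
        ((PySem.List.pyRange l r 1).map G)
      = (PySem.List.pyRange l r 1).map (fun n => G n ++ List.replicate (cnt p 0 n) p) := by
  simp only [altDiv_eq]
  have hrw := foldl_modify_map_range l r (fun j => List.replicate (pmul p j.toNat j) p)
    (PySem.List.pyRange (max p ((PySem.Int.floordiv (l - 1) p + 1) * p)) r p) G
    (nodup_pyRange_pos _ _ _ (by omega))
    (fun j hj => by
      obtain ⟨h1, h2, _⟩ := (PySem.List.mem_pyRange_iff_of_pos (by omega : (0:Int) < p) j).1 hj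
      have hM : l - 1 < (PySem.Int.floordiv (l - 1) p + 1) * p :=
        ((PySem.Int.floordiv_eq_iff_of_pos (by omega)).1 rfl).2
      have := le_max_right p ((PySem.Int.floordiv (l - 1) p + 1) * p)
      exact ⟨by omega, h2⟩)
  rw [hrw]
  apply List.map_congr_left
  intro n hn
  have hnb := PySem.List.mem_pyRange_one.1 hn
  have hiff := mem_markRange_iff l r p hp n hnb.1 hnb.2
  split_ifs with hmem
  · obtain ⟨hn1, hdv⟩ := hiff.1 hmem
    simp [cnt, hn1]
  · have hc : ¬ (1 ≤ n ∧ p ∣ n) := fun h => hmem (hiff.2 h)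
    by_cases hn1 : 1 ≤ n
    · have hnd : ¬ p ∣ n := fun hd => hc ⟨hn1, hd⟩
      simp [cnt, hn1, pmul_zero_of_not_dvd p n hn1 hnd]
    · simp [cnt, hn1]

theorem phase2B (l r : Int) :
    ∀ (ps : List Int) (G : Int → List Int), (∀ p ∈ ps, 2 ≤ p) →
      ps.foldl (fun rli p =>
          (PySem.List.pyRange (max p ((PySem.Int.floordiv (l - 1) p + 1) * p)) r p).foldl
            (fun a j => a.modify (j - l).toNat (fun fac => altDiv p j.toNat j fac)) rli)
        ((PySem.List.pyRange l r 1).map G)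
        = (PySem.List.pyRange l r 1).map (fun n => G n ++ slotCat ps n) := by
  intro ps
  induction ps with
  | nil =>
    intro G _
    simp [slotCat]
  | cons p ps ih =>
    intro G h
    have hp2 : 2 ≤ p := h p (List.mem_cons_self)
    rw [List.foldl_cons, altMark_spec l r p hp2 G,
        ih _ (fun q hq => h q (List.mem_cons_of_mem p hq))]
    apply List.map_congr_left
    intro n _
    rw [slotCat_cons, List.append_assoc]

theorem phase1 (l r : Int) :
    ∀ (is : List Int) (li li2 li22 : Array Int) (rli : List (List Int)) (ps : List Int),
      ∃ delta,
        altSieveLoop (li, ps) is = ps ++ delta ∧ (∀ p ∈ delta, p ∈ is) ∧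
        segcheLoop l r (li, li2, li22, rli) is
          = delta.foldl (fun a p => segcheInner l r p 50 1 a) rli := by
  intro is
  induction is with
  | nil =>
    intro li li2 li22 rli ps
    exact ⟨[], by simp [altSieveLoop], by simp, rfl⟩
  | cons i is ih =>
    intro li li2 li22 rli ps
    rw [segcheLoop, altSieveLoop]
    by_cases hd : li[i.toNat]?.getD 0 = 0
    · have hA : segcheStep l r (li, li2, li22, rli) i
          = (((PySem.List.pyRange (i + i) 50001 i).foldl (segcheMark i) (li, li2, li22)).1,
             ((PySem.List.pyRange (i + i) 50001 i).foldl (segcheMark i) (li, li2, li22)).2.1,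
             ((PySem.List.pyRange (i + i) 50001 i).foldl (segcheMark i) (li, li2, li22)).2.2,
             segcheInner l r i 50 1 rli) := by
        simp [segcheStep, hd]
      have hB : altSieveStep (li, ps) i
          = ((PySem.List.pyRange (i + i) 50001 i).foldl (fun c j => c.set! j.toNat 1) li,
             ps ++ [i]) := by
        simp [altSieveStep, hd]
      rw [hA, hB, mark_fst]
      obtain ⟨d, h1, h2, h3⟩ := ih
        ((PySem.List.pyRange (i + i) 50001 i).foldl (fun c j => c.set! j.toNat 1) li)
        ((PySem.List.pyRange (i + i) 50001 i).foldl (segcheMark i) (li, li2, li22)).2.1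
        ((PySem.List.pyRange (i + i) 50001 i).foldl (segcheMark i) (li, li2, li22)).2.2
        (segcheInner l r i 50 1 rli) (ps ++ [i])
      refine ⟨i :: d, ?_, ?_, ?_⟩
      · rw [h1]; simp
      · intro p hp
        rcases List.mem_cons.1 hp with h | h
        · simp [h]
        · exact List.mem_cons_of_mem i (h2 p h)
      · rw [h3, List.foldl_cons]
    · have hA : segcheStep l r (li, li2, li22, rli) i = (li, li2, li22, rli) := by
        simp [segcheStep, hd]
      have hB : altSieveStep (li, ps) i = (li, ps) := by
        simp [altSieveStep, hd]
      rw [hA, hB]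
      obtain ⟨d, h1, h2, h3⟩ := ih li li2 li22 rli ps
      exact ⟨d, h1, fun p hp => List.mem_cons_of_mem i (h2 p hp), h3⟩

-- ===== VERDICT (by name: the statement is the Claim_ definition above) =====
theorem segche_spec : Claim_equal_segche := by
  intro l r maxr hdom
  have hr : r ≤ 2147483648 := by
    unfold Dom_segche pvDomInt at hdom
    simp only [Bool.and_eq_true, decide_eq_true_eq] at hdom
    exact hdom.1.2.2
  unfold Spec_segche segche segche_alt altPrimes
  obtain ⟨delta, h1, h2, h3⟩ := phase1 l r (PySem.List.pyRange 2 50001 1)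
    (Array.replicate 50001 0) (Array.replicate 50001 0) (Array.replicate 50001 0)
    (List.replicate (r - l).toNat []) []
  rw [h3, h1, List.nil_append]
  have hdel2 : ∀ p ∈ delta, 2 ≤ p := fun p hp =>
    (PySem.List.mem_pyRange_one.1 (h2 p hp)).1
  have hrli0 : List.replicate (r - l).toNat ([] : List Int)
      = (PySem.List.pyRange l r 1).map (fun _ => []) := by
    rw [List.map_const', PySem.List.length_pyRange_one]
  rw [hrli0, phase2 l r hr delta (fun _ => []) hdel2, phase2B l r delta (fun _ => []) hdel2]
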